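-- pv_equiv track=rewrite | github.com/TEAM-JANDI/algorithm-playground | geunhyung/programmers/인사고과.py | solution
-- ===== SOURCE A (Python) =====
-- def solution(scores):
--     answer = 1
--     temp = 0
--     target_sum, target_first, target_second = sum(scores[0]), scores[0][0], scores[0][1]
--     scores.sort(key=lambda x: (-x[0], x[1]))
--
--     for a, b in scores:
--         if target_first < a and target_second < b:
--             return -1
--         if temp <= b:
--             temp = b
--             if a + b > target_sum:
--                 answer += 1
--     return answer
-- ===== SOURCE B (Python) =====
-- def solution(scores):
--     target_sum = sum(scores[0])
--     target_first, target_second = scores[0][0], scores[0][1]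
--     for a, b in scores:
--         if a > target_first and b > target_second:
--             return -1
--     answer = 1
--     for a, b in scores:
--         if a + b <= target_sum:
--             continue
--         best = 0
--         for c, d in scores:
--             if c > a and d > best:
--                 best = d
--         if b >= best:
--             answer += 1
--     return answer
-- ===== Notes on version B (the rewrite author's own statement) =====
-- stated objective: alternative
-- what changed: A sorts by (-a,b) and fuses a running-max Pareto filter with the count in one pass; B never sorts and instead, for each employee, computes the best second score among strictly-higher-first-score employees with a nested scan (quadratic pairwise domination test), after a separate scan for the -1 case.
-- outside the precondition, e.g. on solution([[1, 1], [5, 5], [2, 2, 2]]): A returns -1, B returns -1; on solution([[1, 1], [2, 2, 2], [5, 5]]): A returns -1, B raises ValueError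
import Mathlib
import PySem

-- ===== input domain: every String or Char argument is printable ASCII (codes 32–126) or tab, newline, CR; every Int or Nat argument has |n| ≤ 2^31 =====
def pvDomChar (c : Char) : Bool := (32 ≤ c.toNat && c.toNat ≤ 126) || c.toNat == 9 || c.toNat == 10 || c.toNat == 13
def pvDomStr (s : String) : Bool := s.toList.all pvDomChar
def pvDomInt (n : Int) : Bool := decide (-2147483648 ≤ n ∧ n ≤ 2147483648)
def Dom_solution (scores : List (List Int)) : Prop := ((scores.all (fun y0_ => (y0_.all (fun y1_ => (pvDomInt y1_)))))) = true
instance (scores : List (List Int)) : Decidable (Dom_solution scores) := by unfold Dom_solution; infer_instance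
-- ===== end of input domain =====

-- B replaces A's sort + fused running-max pass by a sort-free quadratic pairwise-domination
-- scan (alternative algorithm, same return value). A sorts `scores` in place in Python and B
-- does not; the equivalence proved here is about the return value only.

-- ===== PORT A =====
-- A's single for-loop over the sorted list: early -1 return, running max `temp`, counter `answer`.
def solutionLoop (tFirst tSecond tSum : Int) : List (List Int) → Int → Int → Int
  | [], _, answer => answer
  | row :: rest, temp, answer =>
    let a := row.getD 0 0
    let b := row.getD 1 0
    if tFirst < a ∧ tSecond < b then -1
    else if temp ≤ b then
      solutionLoop tFirst tSecond tSum rest b (if tSum < a + b then answer + 1 else answer)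
    else
      solutionLoop tFirst tSecond tSum rest temp answer

def solution (scores : List (List Int)) : Int :=
  let first := scores.headD []
  let tSum := first.sum
  let tFirst := first.getD 0 0
  let tSecond := first.getD 1 0
  let sorted := PySem.List.sorted2 scores (fun x => -(x.getD 0 0)) (fun x => x.getD 1 0)
  solutionLoop tFirst tSecond tSum sorted 0 1

-- ===== PORT B =====
-- B's first loop: scan for an employee strictly dominating scores[0] (the early `return -1`).
def hasDominator (tFirst tSecond : Int) : List (List Int) → Bool
  | [] => false
  | row :: rest =>
    if tFirst < row.getD 0 0 ∧ tSecond < row.getD 1 0 then true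
    else hasDominator tFirst tSecond rest

-- B's inner loop: best second score among employees with first score strictly above `a`.
def bestLoop (a : Int) : List (List Int) → Int → Int
  | [], best => best
  | row :: rest, best =>
    bestLoop a rest (if a < row.getD 0 0 ∧ best < row.getD 1 0 then row.getD 1 0 else best)

-- B's second loop: count rows beating target_sum whose b reaches the inner loop's best.
def countLoop (tSum : Int) (all : List (List Int)) : List (List Int) → Int → Int
  | [], answer => answer
  | row :: rest, answer =>
    let a := row.getD 0 0
    let b := row.getD 1 0
    if a + b ≤ tSum then countLoop tSum all rest answer
    else countLoop tSum all rest (if bestLoop a all 0 ≤ b then answer + 1 else answer)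

def solution_alt (scores : List (List Int)) : Int :=
  let first := scores.headD []
  let tSum := first.sum
  let tFirst := first.getD 0 0
  let tSecond := first.getD 1 0
  if hasDominator tFirst tSecond scores then -1
  else countLoop tSum scores scores 1

-- ===== PRECONDITION & SPEC =====
-- Pre_ excludes inputs where Python A raises: IndexError on empty scores (scores[0]),
-- IndexError/ValueError when some row does not have exactly two elements (sort key / tuple
-- unpacking); a malformed row placed after an early -1 return is never unpacked by A, so a
-- few such inputs on which A returns -1 are also excluded (natural domain: rows are pairs).
def Pre_solution (scores : List (List Int)) : Prop :=
  scores ≠ [] ∧ ∀ r ∈ scores, r.length = 2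
instance (scores : List (List Int)) : Decidable (Pre_solution scores) := by
  unfold Pre_solution; infer_instance
def pvWitness_solution : List (List Int) := [[2, 2], [1, 4], [3, 2]]

def Spec_solution (scores : List (List Int)) (out : Int) : Prop := out = solution_alt scores
instance (scores : List (List Int)) (out : Int) : Decidable (Spec_solution scores out) := by unfold Spec_solution; infer_instance

-- ===== CLAIM (what is proved, stated in full; the proofs are below) =====
def Claim_equal_solution : Prop := ∀ (scores : List (List Int)), Dom_solution scores → Pre_solution scores → Spec_solution scores (solution scores)

-- ===== LEMMAS AND PROOFS =====

-- number of survivors of A's running-max filter (temp seeded at `temp`) beating tSum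
def cntF (tSum : Int) : List (List Int) → Int → Nat
  | [], _ => 0
  | row :: rest, temp =>
    if temp ≤ row.getD 1 0 then
      (if tSum < row.getD 0 0 + row.getD 1 0 then 1 else 0) + cntF tSum rest (row.getD 1 0)
    else cntF tSum rest temp

theorem solutionLoop_eq (tF tS tSum : Int) (l : List (List Int)) (temp ans : Int) :
    solutionLoop tF tS tSum l temp ans =
      if l.any (fun row => decide (tF < row.getD 0 0) && decide (tS < row.getD 1 0)) then -1
      else ans + (cntF tSum l temp : Int) := by
  induction l generalizing temp ans with
  | nil => simp [solutionLoop, cntF]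
  | cons row rest ih =>
    simp only [solutionLoop, cntF, List.any_cons, List.getD_eq_getElem?_getD, ih,
      Bool.or_eq_true, Bool.and_eq_true, decide_eq_true_eq]
    by_cases hd : tF < (row[0]?).getD 0 ∧ tS < (row[1]?).getD 0
    · simp [hd]
    · simp only [hd, false_or]
      by_cases hr : (rest.any fun r => decide (tF < r.getD 0 0) && decide (tS < r.getD 1 0)) = true
      · simp only [List.getD_eq_getElem?_getD] at hr
        simp [hr]
      · simp only [List.getD_eq_getElem?_getD] at hr
        simp only [hr, if_false, Bool.false_eq_true]
        split_ifs <;> push_cast <;> ring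

-- the lexicographic sort order A uses, as a pairwise relation
def sortedRel (x y : List Int) : Prop :=
  y.getD 0 0 ≤ x.getD 0 0 ∧ (y.getD 0 0 < x.getD 0 0 ∨ x.getD 1 0 ≤ y.getD 1 0)

-- generic: insertBy with an asymmetric transitive `before` preserves Pairwise (¬ before swap)
theorem pairwise_insertBy {α : Type} (before : α → α → Bool)
    (hasym : ∀ x y, before x y = true → before y x = false)
    (htrans : ∀ x y z, before x y = true → before y z = true → before x z = true)
    (x : α) (l : List α) (h : l.Pairwise (fun p q => before q p = false)) :
    (PySem.List.insertBy before x l).Pairwise (fun p q => before q p = false) := by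
  induction l with
  | nil => simp [PySem.List.insertBy]
  | cons y ys ih =>
    rw [List.pairwise_cons] at h
    obtain ⟨hy, hys⟩ := h
    by_cases hb : before x y = true
    · simp only [PySem.List.insertBy, hb, if_pos]
      refine List.Pairwise.cons ?_ (List.Pairwise.cons hy hys)
      intro w hw
      rcases List.mem_cons.mp hw with rfl | hw'
      · exact hasym x w hb
      · by_contra hwx
        have hwx' : before w x = true := by
          cases hv : before w x with
          | false => exact absurd hv hwx
          | true => rfl
        have := htrans w x y hwx' hb
        rw [hy w hw'] at this
        exact Bool.false_ne_true this
    · have hb' : before x y = false := by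
        cases hv : before x y with
        | false => rfl
        | true => exact absurd hv hb
      simp only [PySem.List.insertBy, hb, Bool.false_eq_true, if_false]
      refine List.Pairwise.cons ?_ (ih hys)
      intro w hw
      rw [PySem.List.mem_insertBy] at hw
      rcases hw with rfl | hw
      · exact hb'
      · exact hy w hw

theorem pairwise_foldl_insertBy {α : Type} (before : α → α → Bool)
    (hasym : ∀ x y, before x y = true → before y x = false)
    (htrans : ∀ x y z, before x y = true → before y z = true → before x z = true)
    (xs : List α) (acc : List α) (h : acc.Pairwise (fun p q => before q p = false)) :
    (xs.foldl (fun acc x => PySem.List.insertBy before x acc) acc).Pairwise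
      (fun p q => before q p = false) := by
  induction xs generalizing acc with
  | nil => exact h
  | cons x xs ih =>
    exact ih _ (pairwise_insertBy before hasym htrans x acc h)

-- the concrete `before` of sorted2 with keys (-a, b)
def beforeAB (x y : List Int) : Bool :=
  decide (-(x.getD 0 0) < -(y.getD 0 0)) ||
    (!decide (-(y.getD 0 0) < -(x.getD 0 0)) && decide (x.getD 1 0 < y.getD 1 0))

theorem beforeAB_iff (x y : List Int) :
    beforeAB x y = true ↔
      (y.getD 0 0 < x.getD 0 0 ∨ (y.getD 0 0 ≤ x.getD 0 0 ∧ x.getD 1 0 < y.getD 1 0)) := by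
  simp only [beforeAB, Bool.or_eq_true, Bool.and_eq_true, Bool.not_eq_true',
    decide_eq_true_eq, decide_eq_false_iff_not]
  omega

theorem sorted2_pairwise (scores : List (List Int)) :
    (PySem.List.sorted2 scores (fun x => -(x.getD 0 0)) (fun x => x.getD 1 0)).Pairwise
      sortedRel := by
  have hmain :
      (PySem.List.sorted2 scores (fun x => -(x.getD 0 0)) (fun x => x.getD 1 0)).Pairwise
        (fun p q => beforeAB q p = false) := by
    have hofold :
        PySem.List.sorted2 scores (fun x => -(x.getD 0 0)) (fun x => x.getD 1 0) =
          scores.foldl (fun acc x => PySem.List.insertBy beforeAB x acc) [] := by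
      simp only [PySem.List.sorted2]
      rfl
    rw [hofold]
    refine pairwise_foldl_insertBy beforeAB ?_ ?_ scores [] (by simp)
    · intro x y hxy
      have h1 := (beforeAB_iff x y).mp hxy
      rw [Bool.eq_false_iff, Ne, beforeAB_iff]
      omega
    · intro x y z hxy hyz
      have h1 := (beforeAB_iff x y).mp hxy
      have h2 := (beforeAB_iff y z).mp hyz
      rw [beforeAB_iff]
      omega
  refine hmain.imp ?_
  intro p q hpq
  rw [Bool.eq_false_iff, Ne, beforeAB_iff] at hpq
  unfold sortedRel
  omega

-- characterization of B's inner running-max loop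
theorem bestLoop_le (av : Int) (l : List (List Int)) (best b : Int) :
    bestLoop av l best ≤ b ↔ (best ≤ b ∧ ∀ z ∈ l, av < z.getD 0 0 → z.getD 1 0 ≤ b) := by
  induction l generalizing best with
  | nil => simp [bestLoop]
  | cons row rest ih =>
    simp only [bestLoop, List.mem_cons, forall_eq_or_imp, ih]
    constructor
    · rintro ⟨h1, h2⟩
      split_ifs at h1 with hc
      · exact ⟨by omega, fun _ => h1, h2⟩
      · exact ⟨h1, fun ha => by omega, h2⟩
    · rintro ⟨h1, h2, h3⟩
      refine ⟨?_, h3⟩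
      split_ifs with hc
      · exact h2 hc.1
      · exact h1

-- B's counting loop as a countP
theorem countLoop_eq (tSum : Int) (all l : List (List Int)) (ans : Int) :
    countLoop tSum all l ans =
      ans + (l.countP (fun r => decide (tSum < r.getD 0 0 + r.getD 1 0) &&
        decide (bestLoop (r.getD 0 0) all 0 ≤ r.getD 1 0)) : Int) := by
  induction l generalizing ans with
  | nil => simp [countLoop]
  | cons row rest ih =>
    simp only [countLoop, List.countP_cons, ih]
    by_cases h1 : row.getD 0 0 + row.getD 1 0 ≤ tSum
    · rw [if_pos h1]
      have hp : (decide (tSum < row.getD 0 0 + row.getD 1 0) &&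
          decide (bestLoop (row.getD 0 0) all 0 ≤ row.getD 1 0)) = false := by
        simp only [Bool.and_eq_false_iff, decide_eq_false_iff_not]
        left; omega
      rw [hp]; simp
    · rw [if_neg h1]
      by_cases h2 : bestLoop (row.getD 0 0) all 0 ≤ row.getD 1 0
      · have hp : (decide (tSum < row.getD 0 0 + row.getD 1 0) &&
            decide (bestLoop (row.getD 0 0) all 0 ≤ row.getD 1 0)) = true := by
          simp only [Bool.and_eq_true, decide_eq_true_eq]
          exact ⟨by omega, h2⟩
        rw [if_pos h2, hp]
        split_ifs with hq
        · push_cast; ring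
        · exact absurd (by trivial) hq
      · have hp : (decide (tSum < row.getD 0 0 + row.getD 1 0) &&
            decide (bestLoop (row.getD 0 0) all 0 ≤ row.getD 1 0)) = false := by
          simp only [Bool.and_eq_false_iff, decide_eq_false_iff_not]
          right; exact h2
        rw [if_neg h2, hp]; simp

-- B's -1 scan as an any
theorem hasDominator_eq_any (tF tS : Int) (l : List (List Int)) :
    hasDominator tF tS l =
      l.any (fun row => decide (tF < row.getD 0 0) && decide (tS < row.getD 1 0)) := by
  induction l with
  | nil => simp [hasDominator]
  | cons row rest ih =>
    simp only [hasDominator, List.any_cons, ih]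
    by_cases h : tF < row.getD 0 0 ∧ tS < row.getD 1 0
    · rw [if_pos h]
      have hp : (decide (tF < row.getD 0 0) && decide (tS < row.getD 1 0)) = true := by
        simp only [Bool.and_eq_true, decide_eq_true_eq]; exact h
      rw [hp]; simp
    · rw [if_neg h]
      have hp : (decide (tF < row.getD 0 0) && decide (tS < row.getD 1 0)) = false := by
        simp only [Bool.and_eq_false_iff, decide_eq_false_iff_not]; tauto
      rw [hp]; simp

-- MAIN: on a lex-sorted list, A's fused running-max count equals a per-element global test
theorem cntF_eq (tSum : Int) (l : List (List Int)) (temp : Int)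
    (hs : l.Pairwise sortedRel) :
    cntF tSum l temp =
      l.countP (fun r => decide (tSum < r.getD 0 0 + r.getD 1 0) && decide (temp ≤ r.getD 1 0) &&
        l.all (fun z => !decide (r.getD 0 0 < z.getD 0 0) || decide (z.getD 1 0 ≤ r.getD 1 0))) := by
  induction l generalizing temp with
  | nil => simp [cntF]
  | cons row rest ih =>
    rw [List.pairwise_cons] at hs
    obtain ⟨hrow, hrest⟩ := hs
    rw [List.countP_cons]
    by_cases ht : temp ≤ row.getD 1 0
    · have hhead : (decide (tSum < row.getD 0 0 + row.getD 1 0) && decide (temp ≤ row.getD 1 0) &&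
          (row :: rest).all
            (fun z => !decide (row.getD 0 0 < z.getD 0 0) || decide (z.getD 1 0 ≤ row.getD 1 0)))
          = decide (tSum < row.getD 0 0 + row.getD 1 0) := by
        have hall : ((row :: rest).all
            (fun z => !decide (row.getD 0 0 < z.getD 0 0) || decide (z.getD 1 0 ≤ row.getD 1 0)))
            = true := by
          simp only [List.all_eq_true, List.mem_cons, Bool.or_eq_true, Bool.not_eq_true',
            decide_eq_false_iff_not, decide_eq_true_eq]
          rintro z (rfl | hz)
          · left; omega
          · have := hrow z hz; unfold sortedRel at this; left; omega
        rw [hall, decide_eq_true ht]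
        simp
      have hcong : rest.countP (fun r => decide (tSum < r.getD 0 0 + r.getD 1 0) &&
            decide (row.getD 1 0 ≤ r.getD 1 0) &&
            rest.all (fun z => !decide (r.getD 0 0 < z.getD 0 0) || decide (z.getD 1 0 ≤ r.getD 1 0)))
          = rest.countP (fun r => decide (tSum < r.getD 0 0 + r.getD 1 0) &&
            decide (temp ≤ r.getD 1 0) &&
            (row :: rest).all
              (fun z => !decide (r.getD 0 0 < z.getD 0 0) || decide (z.getD 1 0 ≤ r.getD 1 0))) := by
        apply List.countP_congr
        intro r hr
        have hRr := hrow r hr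
        unfold sortedRel at hRr
        simp only [List.all_cons, List.all_eq_true, Bool.and_eq_true, Bool.or_eq_true,
          Bool.not_eq_true', decide_eq_false_iff_not, decide_eq_true_eq]
        constructor
        · rintro ⟨⟨hsum, hbv⟩, hallr⟩
          exact ⟨⟨hsum, by omega⟩, Or.inr hbv, hallr⟩
        · rintro ⟨⟨hsum, htv⟩, hhd, hallr⟩
          refine ⟨⟨hsum, ?_⟩, hallr⟩
          rcases hRr with ⟨h1, h2⟩
          rcases hhd with hhd | hhd <;> rcases h2 with h2 | h2 <;> omega
      simp only [cntF, if_pos ht, ih (row.getD 1 0) hrest, hcong, hhead]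
      have hone : (if (true : Bool) = true then (1 : Nat) else 0) = 1 := rfl
      have hzero : (if (false : Bool) = true then (1 : Nat) else 0) = 0 := rfl
      by_cases hc : tSum < row.getD 0 0 + row.getD 1 0
      · rw [decide_eq_true hc, if_pos hc, hone]
        omega
      · rw [decide_eq_false hc, if_neg hc, hzero]
        omega
    · have hhead : (decide (tSum < row.getD 0 0 + row.getD 1 0) && decide (temp ≤ row.getD 1 0) &&
          (row :: rest).all
            (fun z => !decide (row.getD 0 0 < z.getD 0 0) || decide (z.getD 1 0 ≤ row.getD 1 0)))
          = false := by
        have hp : decide (temp ≤ row.getD 1 0) = false := by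
          simp only [decide_eq_false_iff_not]; exact ht
        rw [hp]; simp
      have hcong : rest.countP (fun r => decide (tSum < r.getD 0 0 + r.getD 1 0) &&
            decide (temp ≤ r.getD 1 0) &&
            rest.all (fun z => !decide (r.getD 0 0 < z.getD 0 0) || decide (z.getD 1 0 ≤ r.getD 1 0)))
          = rest.countP (fun r => decide (tSum < r.getD 0 0 + r.getD 1 0) &&
            decide (temp ≤ r.getD 1 0) &&
            (row :: rest).all
              (fun z => !decide (r.getD 0 0 < z.getD 0 0) || decide (z.getD 1 0 ≤ r.getD 1 0))) := by
        apply List.countP_congr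
        intro r hr
        have hRr := hrow r hr
        unfold sortedRel at hRr
        simp only [List.all_cons, List.all_eq_true, Bool.and_eq_true, Bool.or_eq_true,
          Bool.not_eq_true', decide_eq_false_iff_not, decide_eq_true_eq]
        constructor
        · rintro ⟨⟨hsum, htv⟩, hallr⟩
          refine ⟨⟨hsum, htv⟩, ?_, hallr⟩
          by_cases hlt : r.getD 0 0 < row.getD 0 0
          · right; omega
          · left; exact hlt
        · rintro ⟨⟨hsum, htv⟩, _, hallr⟩
          exact ⟨⟨hsum, htv⟩, hallr⟩
      have hzero : (if (false : Bool) = true then (1 : Nat) else 0) = 0 := rfl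
      simp only [cntF, if_neg ht, ih temp hrest, hcong, hhead]
      rw [hzero]
      omega

-- ===== VERDICT (by name: the statement is the Claim_ definition above) =====
theorem solution_spec : Claim_equal_solution := by
  intro scores _ _
  unfold Spec_solution
  simp only [solution, solution_alt]
  set first := scores.headD [] with hfirst
  set tSum := first.sum
  set tF := first.getD 0 0
  set tS := first.getD 1 0
  set sorted := PySem.List.sorted2 scores (fun x => -(x.getD 0 0)) (fun x => x.getD 1 0)
    with hsorted
  have hperm : sorted.Perm scores := PySem.List.sorted2_perm scores _ _ false
  rw [solutionLoop_eq, hasDominator_eq_any]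
  have hany : (sorted.any fun row => decide (tF < row.getD 0 0) && decide (tS < row.getD 1 0)) =
      (scores.any fun row => decide (tF < row.getD 0 0) && decide (tS < row.getD 1 0)) := by
    rw [Bool.eq_iff_iff]
    simp only [List.any_eq_true]
    constructor <;> rintro ⟨x, hx, hpx⟩
    · exact ⟨x, hperm.mem_iff.mp hx, hpx⟩
    · exact ⟨x, hperm.mem_iff.mpr hx, hpx⟩
  rw [hany]
  by_cases hd : (scores.any fun row => decide (tF < row.getD 0 0) && decide (tS < row.getD 1 0))
      = true
  · rw [hd]; simp
  · have hd' : (scores.any fun row => decide (tF < row.getD 0 0) && decide (tS < row.getD 1 0))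
        = false := by
      cases hv : (scores.any fun row => decide (tF < row.getD 0 0) && decide (tS < row.getD 1 0))
        with
      | false => rfl
      | true => exact absurd hv hd
    rw [hd']
    simp only [Bool.false_eq_true, if_false]
    rw [countLoop_eq]
    congr 1
    rw [cntF_eq tSum sorted 0 (sorted2_pairwise scores)]
    have hstep : sorted.countP (fun r => decide (tSum < r.getD 0 0 + r.getD 1 0) &&
          decide ((0:Int) ≤ r.getD 1 0) &&
          sorted.all (fun z => !decide (r.getD 0 0 < z.getD 0 0) || decide (z.getD 1 0 ≤ r.getD 1 0)))
        = sorted.countP (fun r => decide (tSum < r.getD 0 0 + r.getD 1 0) &&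
          decide (bestLoop (r.getD 0 0) scores 0 ≤ r.getD 1 0)) := by
      apply List.countP_congr
      intro r _
      simp only [Bool.and_eq_true, List.all_eq_true, Bool.or_eq_true, Bool.not_eq_true',
        decide_eq_false_iff_not, decide_eq_true_eq]
      rw [bestLoop_le]
      constructor
      · rintro ⟨⟨hsum, h0⟩, hall⟩
        refine ⟨hsum, h0, ?_⟩
        intro z hz ha
        have := hall z (hperm.mem_iff.mpr hz)
        omega
      · rintro ⟨hsum, h0, hall⟩
        refine ⟨⟨hsum, h0⟩, ?_⟩
        intro z hz
        by_cases ha : r.getD 0 0 < z.getD 0 0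
        · right; exact hall z (hperm.mem_iff.mp hz) ha
        · left; exact ha
    rw [hstep, hperm.countP_eq]
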